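-- pv_equiv track=rewrite | github.com/Soul-Legend/LexicalAnalyzer | regex_processing.py | expand_char_class
-- ===== SOURCE A (Python) =====
-- def expand_char_class(char_class_str):
--     content = char_class_str[1:-1]
--     expanded_chars = []
--     i = 0
--     while i < len(content):
--         if i + 2 < len(content) and content[i+1] == '-':
--             start_char = content[i]
--             end_char = content[i+2]
--             if start_char.isalpha() and end_char.isalpha():
--                 for char_code in range(ord(start_char), ord(end_char) + 1):
--                     expanded_chars.append(chr(char_code))
--             elif start_char.isdigit() and end_char.isdigit():
--                  for char_code in range(ord(start_char), ord(end_char) + 1):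
--                     expanded_chars.append(chr(char_code))
--             else: # Handle cases like [a-], [-z] or invalid ranges as literals
--                 expanded_chars.append(start_char)
--                 if i+1 < len(content): expanded_chars.append(content[i+1])
--                 if i+2 < len(content): expanded_chars.append(content[i+2])
--
--             i += 3
--         else:
--             expanded_chars.append(content[i])
--             i += 1
--     if not expanded_chars:
--         return ""
--     return "(" + "|".join(expanded_chars) + ")"
-- ===== SOURCE B (Python) =====
-- import re
--
-- def expand_char_class(char_class_str):
--     # Regex-driven: finditer tokenizes the class body into range / single-char
--     # matches in one declarative pattern instead of a manual index loop.
--     chars = []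
--     for m in re.finditer(r'(.)-(.)|(.)', char_class_str[1:-1], re.DOTALL):
--         if m.group(3) is not None:
--             chars.append(m.group(3))
--         else:
--             a, b = m.group(1), m.group(2)
--             if (a.isalpha() and b.isalpha()) or (a.isdigit() and b.isdigit()):
--                 chars.extend(map(chr, range(ord(a), ord(b) + 1)))
--             else:
--                 chars.extend((a, '-', b))
--     return '(' + '|'.join(chars) + ')' if chars else ''
-- ===== Notes on version B (the rewrite author's own statement) =====
-- stated objective: idiomatic
-- what changed: Replaces the manual index while-loop with regex tokenization: re.finditer(r'(.)-(.)|(.)', body, re.DOTALL) yields the non-overlapping range/single-char matches, and a for-loop over the matches expands each one (chr range for valid alpha/digit ranges, the three literals otherwise).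
import Mathlib
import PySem

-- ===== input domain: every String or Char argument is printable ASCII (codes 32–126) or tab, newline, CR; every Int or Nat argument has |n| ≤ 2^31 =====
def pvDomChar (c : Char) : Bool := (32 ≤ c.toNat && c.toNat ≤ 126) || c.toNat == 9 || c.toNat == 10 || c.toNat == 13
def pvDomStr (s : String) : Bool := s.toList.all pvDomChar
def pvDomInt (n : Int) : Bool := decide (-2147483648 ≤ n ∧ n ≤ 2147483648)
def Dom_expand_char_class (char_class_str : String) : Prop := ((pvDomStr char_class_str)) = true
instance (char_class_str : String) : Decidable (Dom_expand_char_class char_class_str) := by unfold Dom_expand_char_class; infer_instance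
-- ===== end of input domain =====

-- B replaces A's manual index while-loop with a regex-finditer tokenization
-- ('(.)-(.)|(.)' over the class body) followed by a per-match expansion loop
-- (objective: more idiomatic, same cost); the RETURN value is proved equal on all strings.

-- ===== PORT A =====
-- A's while loop over an index i, threading the appended-characters accumulator.
def eccLoopA (cs : List Char) (i : Nat) (acc : List Char) : List Char :=
  if _h : i < cs.length then
    if _h2 : i + 2 < cs.length ∧ cs.getD (i+1) ' ' = '-' then
      let s := cs.getD i ' '
      let e := cs.getD (i+2) ' '
      let acc' :=
        if PySem.Chars.isalpha s && PySem.Chars.isalpha e then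
          (PySem.List.pyRange (s.toNat : Int) ((e.toNat : Int) + 1) 1).foldl
            (fun a n => a ++ [Char.ofNat n.toNat]) acc
        else if PySem.Chars.isdigit s && PySem.Chars.isdigit e then
          (PySem.List.pyRange (s.toNat : Int) ((e.toNat : Int) + 1) 1).foldl
            (fun a n => a ++ [Char.ofNat n.toNat]) acc
        else
          let a1 := acc ++ [s]
          let a2 := if i + 1 < cs.length then a1 ++ [cs.getD (i+1) ' '] else a1
          if i + 2 < cs.length then a2 ++ [cs.getD (i+2) ' '] else a2
      eccLoopA cs (i+3) acc'
    else
      eccLoopA cs (i+1) (acc ++ [cs.getD i ' '])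
  else acc
termination_by cs.length - i

def expand_char_class (char_class_str : String) : String :=
  if eccLoopA (PySem.List.slice char_class_str.toList (some 1) (some (-1))) 0 [] = [] then ""
  else String.ofList (['('] ++ PySem.Chars.join ['|']
    ((eccLoopA (PySem.List.slice char_class_str.toList (some 1) (some (-1))) 0 []).map (fun c => [c])) ++ [')'])

-- ===== PORT B =====
-- re.finditer(r'(.)-(.)|(.)', content, re.DOTALL): the non-overlapping match list.
-- A match is either a range match 'X-Y' (Sum.inl (X, Y), tried first, consumes 3
-- chars) or a single-char match (Sum.inr, consumes 1); exact on every input.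
def eccFinditer : List Char → List ((Char × Char) ⊕ Char)
  | a :: b :: c :: rest =>
      if b = '-' then Sum.inl (a, c) :: eccFinditer rest
      else Sum.inr a :: eccFinditer (b :: c :: rest)
  | a :: rest => Sum.inr a :: eccFinditer rest
  | [] => []
termination_by l => l.length

-- B's for-loop over the matches, appending/extending the chars list.
def eccCollect (ms : List ((Char × Char) ⊕ Char)) (acc : List Char) : List Char :=
  match ms with
  | [] => acc
  | Sum.inr c :: t => eccCollect t (acc ++ [c])
  | Sum.inl (a, b) :: t =>
      if (PySem.Chars.isalpha a && PySem.Chars.isalpha b)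
          || (PySem.Chars.isdigit a && PySem.Chars.isdigit b) then
        eccCollect t (acc ++ (PySem.List.pyRange (a.toNat : Int) ((b.toNat : Int) + 1) 1).map
          (fun n => Char.ofNat n.toNat))
      else eccCollect t (acc ++ [a, '-', b])

def expand_char_class_alt (char_class_str : String) : String :=
  let chars := eccCollect (eccFinditer (PySem.List.slice char_class_str.toList (some 1) (some (-1)))) []
  if chars = [] then ""
  else String.ofList (['('] ++ PySem.Chars.join ['|'] (chars.map (fun c => [c])) ++ [')'])

-- ===== PRECONDITION & SPEC =====
def Spec_expand_char_class (char_class_str : String) (out : String) : Prop := out = expand_char_class_alt char_class_str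
instance (char_class_str : String) (out : String) : Decidable (Spec_expand_char_class char_class_str out) := by unfold Spec_expand_char_class; infer_instance

-- ===== CLAIM (what is proved, stated in full; the proofs are below) =====
def Claim_equal_expand_char_class : Prop := ∀ (char_class_str : String), Dom_expand_char_class char_class_str → Spec_expand_char_class char_class_str (expand_char_class char_class_str)

-- ===== LEMMAS AND PROOFS =====

theorem pvFlattenMapSingleton {α β : Type} (g : α → β) (l : List α) :
    (l.map (fun x => [g x])).flatten = l.map g := by
  induction l with
  | nil => simp
  | cons a t ih => simp [ih]

theorem eccLoopA_eq_collect (cs : List Char) (i : Nat) (acc : List Char) :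
    eccLoopA cs i acc = eccCollect (eccFinditer (cs.drop i)) acc := by
  have main : ∀ (n i : Nat) (acc : List Char), cs.length - i ≤ n →
      eccLoopA cs i acc = eccCollect (eccFinditer (cs.drop i)) acc := by
    intro n
    induction n with
    | zero =>
      intro i acc h
      rw [eccLoopA]
      have hge : ¬ i < cs.length := by omega
      rw [List.drop_eq_nil_of_le (by omega)]
      simp [hge, eccFinditer, eccCollect]
    | succ n IH =>
      intro i acc h
      rw [eccLoopA]
      by_cases h1 : i < cs.length
      · by_cases hd : i + 2 < cs.length
        · have h1' : i + 1 < cs.length := by omega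
          have e0 : cs.drop i = cs[i] :: cs.drop (i+1) := List.drop_eq_getElem_cons h1
          have e1 : cs.drop (i+1) = cs[i+1] :: cs.drop (i+2) := List.drop_eq_getElem_cons h1'
          have e2 : cs.drop (i+2) = cs[i+2] :: cs.drop (i+3) := List.drop_eq_getElem_cons hd
          rw [e0, e1, e2]
          by_cases hdash : cs[i+1] = '-'
          · have h2 : i + 2 < cs.length ∧ cs.getD (i+1) ' ' = '-' := by
              exact ⟨hd, by rw [List.getD_eq_getElem _ _ h1']; exact hdash⟩
            rw [dif_pos h1, dif_pos h2, eccFinditer, if_pos hdash]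
            rw [IH (i+3) _ (by omega)]
            simp only [List.getD_eq_getElem _ _ h1, List.getD_eq_getElem _ _ h1',
              List.getD_eq_getElem _ _ hd, hdash]
            by_cases ha : (PySem.Chars.isalpha cs[i] && PySem.Chars.isalpha cs[i+2]) = true
            · simp [eccCollect, ha, pvFlattenMapSingleton]
            · by_cases hdg : (PySem.Chars.isdigit cs[i] && PySem.Chars.isdigit cs[i+2]) = true
              · simp [eccCollect, ha, hdg, pvFlattenMapSingleton]
              · simp [eccCollect, ha, hdg, h1', hd]
          · have h2 : ¬ (i + 2 < cs.length ∧ cs.getD (i+1) ' ' = '-') := by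
              rw [List.getD_eq_getElem _ _ h1']; exact fun hc => hdash hc.2
            rw [dif_pos h1, dif_neg h2, eccFinditer, if_neg hdash]
            rw [IH (i+1) _ (by omega), e1, e2]
            simp [eccCollect, List.getElem?_eq_getElem h1]
        · have h2 : ¬ (i + 2 < cs.length ∧ cs.getD (i+1) ' ' = '-') := fun hc => hd hc.1
          rw [dif_pos h1, dif_neg h2]
          have e0 : cs.drop i = cs[i] :: cs.drop (i+1) := List.drop_eq_getElem_cons h1
          rw [IH (i+1) _ (by omega), e0]
          have hlen : (cs.drop (i+1)).length ≤ 1 := by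
            rw [List.length_drop]; omega
          rcases htail : cs.drop (i+1) with _ | ⟨c1, _ | ⟨c2, rest⟩⟩
          · simp [eccFinditer, eccCollect, List.getElem?_eq_getElem h1]
          · simp [eccFinditer, eccCollect, List.getElem?_eq_getElem h1]
          · rw [htail] at hlen; simp at hlen
      · have hge := h1
        rw [List.drop_eq_nil_of_le (by omega)]
        simp [h1, eccFinditer, eccCollect]
  exact main (cs.length - i) i acc le_rfl

-- ===== VERDICT (by name: the statement is the Claim_ definition above) =====
theorem expand_char_class_spec : Claim_equal_expand_char_class := by
  intro s _
  unfold Spec_expand_char_class expand_char_class expand_char_class_alt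
  rw [eccLoopA_eq_collect]
  simp
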